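-- pv_equiv track=rewrite | github.com/zl1166/AI-Salary-Negotiation-Bot | backend/ai_agents.py | get_recent_exchanges
-- ===== SOURCE A (Python) =====
-- def get_recent_exchanges(session_data, num_messages=3):
--     """Get the most recent messages from both parties"""
--     facts = session_data.get("facts", {})
--     messages = session_data.get("messages", [])
--
--     # Get last 3 messages from each role
--     job_seeker_messages = []
--     recruiter_messages = []
--
--     for msg in reversed(messages):  # Start from most recent
--         if len(job_seeker_messages) < num_messages and msg["role"] == "job_seeker":
--             job_seeker_messages.append(msg["content"])
--         if len(recruiter_messages) < num_messages and msg["role"] == "recruiter":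
--             recruiter_messages.append(msg["content"])
--         if len(job_seeker_messages) >= num_messages and len(recruiter_messages) >= num_messages:
--             break
--
--     return {
--         "job_seeker": list(reversed(job_seeker_messages)),  # Restore chronological order
--         "recruiter": list(reversed(recruiter_messages))
--     }
-- ===== SOURCE B (Python) =====
-- def get_recent_exchanges(session_data, num_messages=3):
--     """Get the most recent messages from both parties"""
--     messages = session_data.get("messages", [])
--     job_seeker = [m["content"] for m in messages if m["role"] == "job_seeker"]
--     recruiter = [m["content"] for m in messages if m["role"] == "recruiter"]
--     return {
--         "job_seeker": job_seeker[max(len(job_seeker) - num_messages, 0):],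
--         "recruiter": recruiter[max(len(recruiter) - num_messages, 0):],
--     }
-- ===== Notes on version B (the rewrite author's own statement) =====
-- stated objective: simpler
-- what changed: Replaces the reverse scan with per-role counters and early break by two forward comprehensions filtering each role, then a len-based tail slice taking the last num_messages of each list.
import Mathlib
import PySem

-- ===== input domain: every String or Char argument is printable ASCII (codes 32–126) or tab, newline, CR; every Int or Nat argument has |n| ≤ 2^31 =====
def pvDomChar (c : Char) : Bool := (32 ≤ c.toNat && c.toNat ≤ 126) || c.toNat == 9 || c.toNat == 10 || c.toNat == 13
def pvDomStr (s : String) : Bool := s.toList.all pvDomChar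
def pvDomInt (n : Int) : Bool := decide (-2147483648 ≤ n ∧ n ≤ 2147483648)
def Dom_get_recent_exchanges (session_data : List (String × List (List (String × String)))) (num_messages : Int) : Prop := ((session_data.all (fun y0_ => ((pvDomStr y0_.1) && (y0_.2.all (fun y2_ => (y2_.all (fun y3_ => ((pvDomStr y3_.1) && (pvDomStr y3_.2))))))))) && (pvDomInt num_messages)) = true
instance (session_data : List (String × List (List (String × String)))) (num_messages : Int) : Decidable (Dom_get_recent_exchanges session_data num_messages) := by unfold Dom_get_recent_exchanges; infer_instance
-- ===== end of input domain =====

-- ===== PORT A =====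
-- B changes only the decomposition (forward filter + tail slice instead of reverse scan with break); not faster.
-- msg[k]: first-match lookup in the association list; Pre_ guarantees the key is present wherever accessed.
def pvLook (m : List (String × String)) (k : String) : String := (List.lookup k m).getD ""

-- the reverse 'for msg in reversed(messages)' loop with its two capped appends and the early 'break'
def pvLoopA (l : List (List (String × String))) (n : Int) (js rc : List String) :
    List String × List String :=
  match l with
  | [] => (js, rc)
  | m :: rest =>
    let js' := if (js.length : Int) < n ∧ pvLook m "role" = "job_seeker" then js ++ [pvLook m "content"] else js
    let rc' := if (rc.length : Int) < n ∧ pvLook m "role" = "recruiter" then rc ++ [pvLook m "content"] else rc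
    if n ≤ (js'.length : Int) ∧ n ≤ (rc'.length : Int) then (js', rc')
    else pvLoopA rest n js' rc'

def get_recent_exchanges (session_data : List (String × List (List (String × String)))) (num_messages : Int) : List (String × List String) :=
  -- facts = session_data.get("facts", {}) is computed by A but never used; its lookup cannot raise
  let messages := (List.lookup "messages" session_data).getD []
  let p := pvLoopA messages.reverse num_messages [] []
  [("job_seeker", p.1.reverse), ("recruiter", p.2.reverse)]

-- ===== PORT B =====
def get_recent_exchanges_alt (session_data : List (String × List (List (String × String)))) (num_messages : Int) : List (String × List String) :=
  let messages := (List.lookup "messages" session_data).getD []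
  let job_seeker := (messages.filter (fun m => pvLook m "role" == "job_seeker")).map (fun m => pvLook m "content")
  let recruiter := (messages.filter (fun m => pvLook m "role" == "recruiter")).map (fun m => pvLook m "content")
  [("job_seeker", PySem.List.slice job_seeker (some (max ((job_seeker.length : Int) - num_messages) 0)) none),
   ("recruiter", PySem.List.slice recruiter (some (max ((recruiter.length : Int) - num_messages) 0)) none)]

-- ===== PRECONDITION & SPEC =====
-- Pre_ excludes inputs where some message lacks a "role" key, or lacks "content" while its role is
-- "job_seeker"/"recruiter": A raises KeyError there unless its early break happens to skip the malformed
-- message (it can return, see the cite), while B's full forward pass always raises KeyError there.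
def Pre_get_recent_exchanges (session_data : List (String × List (List (String × String)))) (num_messages : Int) : Prop :=
  ∀ m ∈ (List.lookup "messages" session_data).getD [],
    (List.lookup "role" m).isSome = true ∧
    ((List.lookup "role" m = some "job_seeker" ∨ List.lookup "role" m = some "recruiter") →
      (List.lookup "content" m).isSome = true)
instance (session_data : List (String × List (List (String × String)))) (num_messages : Int) : Decidable (Pre_get_recent_exchanges session_data num_messages) := by unfold Pre_get_recent_exchanges; infer_instance

def pvWitness_get_recent_exchanges : (List (String × List (List (String × String)))) × Int :=
  ([("messages", [[("role", "job_seeker"), ("content", "hi")], [("role", "recruiter"), ("content", "yo")]])], 1)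

def Spec_get_recent_exchanges (session_data : List (String × List (List (String × String)))) (num_messages : Int) (out : List (String × List String)) : Prop := out = get_recent_exchanges_alt session_data num_messages
instance (session_data : List (String × List (List (String × String)))) (num_messages : Int) (out : List (String × List String)) : Decidable (Spec_get_recent_exchanges session_data num_messages out) := by unfold Spec_get_recent_exchanges; infer_instance

-- ===== CLAIM (what is proved, stated in full; the proofs are below) =====
def Claim_equal_get_recent_exchanges : Prop := ∀ (session_data : List (String × List (List (String × String)))) (num_messages : Int), Dom_get_recent_exchanges session_data num_messages → Pre_get_recent_exchanges session_data num_messages → Spec_get_recent_exchanges session_data num_messages (get_recent_exchanges session_data num_messages)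

-- ===== LEMMAS AND PROOFS =====

-- the per-role chronological content list B builds
def pvF (r : String) (l : List (List (String × String))) : List String :=
  (l.filter (fun m => pvLook m "role" == r)).map (fun m => pvLook m "content")

theorem pvF_cons (r : String) (m : List (String × String)) (l : List (List (String × String))) :
    pvF r (m :: l) = if pvLook m "role" = r then pvLook m "content" :: pvF r l else pvF r l := by
  simp [pvF, List.filter_cons]
  split_ifs <;> simp

-- one step of the loop preserves the 'accumulator ++ take of the remaining filtered tail' shape
theorem pvStep (r : String) (n : Int) (m : List (String × String)) (rest : List (List (String × String))) (acc : List String) :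
    (if (acc.length : Int) < n ∧ pvLook m "role" = r then acc ++ [pvLook m "content"] else acc) ++
      List.take (n - (if (acc.length : Int) < n ∧ pvLook m "role" = r then acc ++ [pvLook m "content"] else acc).length).toNat (pvF r rest)
    = acc ++ List.take (n - acc.length).toNat (pvF r (m :: rest)) := by
  rw [pvF_cons]
  by_cases hr : pvLook m "role" = r
  · by_cases hn : (acc.length : Int) < n
    · have : (n - (acc.length : Int)).toNat = (n - ((acc.length : Int) + 1)).toNat + 1 := by omega
      simp [hr, hn, this, List.take_succ_cons]
    · have h0 : (n - (acc.length : Int)).toNat = 0 := by omega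
      simp [hr, hn, h0]
  · simp [hr]

theorem pvLoopA_eq (l : List (List (String × String))) (n : Int) (js rc : List String) :
    pvLoopA l n js rc =
      (js ++ List.take (n - js.length).toNat (pvF "job_seeker" l),
       rc ++ List.take (n - rc.length).toNat (pvF "recruiter" l)) := by
  induction l generalizing js rc with
  | nil => simp [pvLoopA, pvF]
  | cons m rest ih =>
    rw [pvLoopA]
    rw [show (js ++ List.take (n - js.length).toNat (pvF "job_seeker" (m :: rest)))
        = (if (js.length : Int) < n ∧ pvLook m "role" = "job_seeker" then js ++ [pvLook m "content"] else js) ++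
          List.take (n - (if (js.length : Int) < n ∧ pvLook m "role" = "job_seeker" then js ++ [pvLook m "content"] else js).length).toNat (pvF "job_seeker" rest)
        from (pvStep "job_seeker" n m rest js).symm]
    rw [show (rc ++ List.take (n - rc.length).toNat (pvF "recruiter" (m :: rest)))
        = (if (rc.length : Int) < n ∧ pvLook m "role" = "recruiter" then rc ++ [pvLook m "content"] else rc) ++
          List.take (n - (if (rc.length : Int) < n ∧ pvLook m "role" = "recruiter" then rc ++ [pvLook m "content"] else rc).length).toNat (pvF "recruiter" rest)
        from (pvStep "recruiter" n m rest rc).symm]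
    set js' := if (js.length : Int) < n ∧ pvLook m "role" = "job_seeker" then js ++ [pvLook m "content"] else js with hjs
    set rc' := if (rc.length : Int) < n ∧ pvLook m "role" = "recruiter" then rc ++ [pvLook m "content"] else rc with hrc
    by_cases hb : n ≤ (js'.length : Int) ∧ n ≤ (rc'.length : Int)
    · have h1 : (n - (js'.length : Int)).toNat = 0 := by omega
      have h2 : (n - (rc'.length : Int)).toNat = 0 := by omega
      simp [hb, h1, h2]
    · simp only [if_neg hb]
      exact ih js' rc'

-- filterMap over the reversed list, reversed back, is the tail slice of the forward filtered list
theorem pvTail (r : String) (msgs : List (List (String × String))) (n : Int) :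
    (List.take (n - (([] : List String).length : Int)).toNat (pvF r msgs.reverse)).reverse
      = PySem.List.slice (pvF r msgs) (some (max (((pvF r msgs).length : Int) - n) 0)) none := by
  have hrev : pvF r msgs.reverse = (pvF r msgs).reverse := by
    simp [pvF, List.filter_reverse, List.map_reverse]
  rw [PySem.List.slice_from _ (le_max_right _ _), hrev]
  by_cases hn : n ≤ 0
  · have h0 : (n - (([] : List String).length : Int)).toNat = 0 := by simp; omega
    have hge : (pvF r msgs).length ≤ (max (((pvF r msgs).length : Int) - n) 0).toNat := by omega
    rw [h0, List.take_zero, List.reverse_nil, List.drop_eq_nil_of_le hge]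
  · have hn2 : (0:Int) < n := by omega
    have h1 : (n - (([] : List String).length : Int)).toNat = n.toNat := by simp
    have h2 : (max (((pvF r msgs).length : Int) - n) 0).toNat = (pvF r msgs).length - n.toNat := by omega
    rw [h1, h2, List.take_reverse, List.reverse_reverse]

-- ===== VERDICT (by name: the statement is the Claim_ definition above) =====
theorem get_recent_exchanges_spec : Claim_equal_get_recent_exchanges := by
  intro session_data num_messages _ _
  unfold Spec_get_recent_exchanges get_recent_exchanges get_recent_exchanges_alt
  have h1 := pvTail "job_seeker" ((List.lookup "messages" session_data).getD []) num_messages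
  have h2 := pvTail "recruiter" ((List.lookup "messages" session_data).getD []) num_messages
  simp only [pvLoopA_eq, pvF, List.nil_append] at h1 h2 ⊢
  rw [h1, h2]
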